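-- pv_equiv track=rewrite | github.com/AshishHoodaIITD/competitive_coding | cdf648/d.py | find_occur
-- ===== SOURCE A (Python) =====
-- def find_occur(grid):
--     g_count = 0
--     b_count = 0
--     hash_count = 0
--     for r in grid:
--         for c in r:
--             if c == "G":
--                 g_count+=1
--             elif c == "B":
--                 b_count+=1
--             elif c == "#":
--                 hash_count+=1
--     return g_count, b_count, hash_count
-- ===== SOURCE B (Python) =====
-- def find_occur(grid):
--     def total(ch):
--         return sum(r.count(ch) for r in grid)
--     return total("G"), total("B"), total("#")
-- ===== Notes on version B (the rewrite author's own statement) =====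
-- stated objective: idiomatic
-- what changed: Instead of one pass with three named accumulators and an if/elif chain, B makes three independent tallying passes, one per target character, each summing str.count(ch) over the rows; the branch chain and the mutable counter state disappear.
import Mathlib
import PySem

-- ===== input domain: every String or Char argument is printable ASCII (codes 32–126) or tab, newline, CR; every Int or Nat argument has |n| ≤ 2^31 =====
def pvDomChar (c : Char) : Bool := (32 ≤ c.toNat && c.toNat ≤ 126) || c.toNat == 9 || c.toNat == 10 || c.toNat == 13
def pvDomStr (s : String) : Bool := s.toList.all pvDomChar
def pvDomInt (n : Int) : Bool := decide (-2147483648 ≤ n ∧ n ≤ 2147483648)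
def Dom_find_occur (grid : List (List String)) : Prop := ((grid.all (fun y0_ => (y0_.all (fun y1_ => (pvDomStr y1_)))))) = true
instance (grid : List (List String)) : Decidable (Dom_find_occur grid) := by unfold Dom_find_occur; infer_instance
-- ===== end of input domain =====

-- ===== PORT A =====
def find_occur (grid : List (List String)) : Int × Int × Int :=
  let st := grid.foldl (fun st r =>
    r.foldl (fun st c =>
      if c == "G" then (st.1 + 1, st.2.1, st.2.2)
      else if c == "B" then (st.1, st.2.1 + 1, st.2.2)
      else if c == "#" then (st.1, st.2.1, st.2.2 + 1)
      else st) st) ((0 : Int), (0 : Int), (0 : Int))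
  (st.1, st.2.1, st.2.2)

-- ===== PORT B =====
-- B: three independent tallying passes, one per target character (idiomatic; no branch chain).
def pvTotal (grid : List (List String)) (ch : String) : Int :=
  (grid.map (fun r => (PySem.List.count r ch : Int))).sum

def find_occur_alt (grid : List (List String)) : Int × Int × Int :=
  (pvTotal grid "G", pvTotal grid "B", pvTotal grid "#")

-- ===== PRECONDITION & SPEC =====
def Spec_find_occur (grid : List (List String)) (out : Int × Int × Int) : Prop := out = find_occur_alt grid
instance (grid : List (List String)) (out : Int × Int × Int) : Decidable (Spec_find_occur grid out) := by unfold Spec_find_occur; infer_instance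

-- ===== CLAIM (what is proved, stated in full; the proofs are below) =====
def Claim_equal_find_occur : Prop := ∀ (grid : List (List String)), Dom_find_occur grid → Spec_find_occur grid (find_occur grid)

-- ===== LEMMAS AND PROOFS =====

-- ===== VERDICT (by name: the statement is the Claim_ definition above) =====
theorem pv_inner (r : List String) (g b h : Int) :
    r.foldl (fun st c =>
      if c == "G" then (st.1 + 1, st.2.1, st.2.2)
      else if c == "B" then (st.1, st.2.1 + 1, st.2.2)
      else if c == "#" then (st.1, st.2.1, st.2.2 + 1)
      else st) (g, b, h)
    = (g + r.count "G", b + r.count "B", h + r.count "#") := by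
  induction r generalizing g b h with
  | nil => simp
  | cons c r ih =>
    simp only [List.foldl_cons, List.count_cons]
    by_cases h1 : c = "G"
    · subst h1
      simp only [beq_self_eq_true, if_true, ih, String.reduceBEq]
      simp only [Prod.ext_iff]
      push_cast
      refine ⟨by ring, by ring, by ring⟩
    · by_cases h2 : c = "B"
      · subst h2
        simp only [String.reduceBEq, beq_self_eq_true, if_true, ih]
        simp only [Prod.ext_iff]
        push_cast
        refine ⟨rfl, by ring, rfl⟩
      · by_cases h3 : c = "#"
        · subst h3
          simp only [String.reduceBEq, beq_self_eq_true, if_true, ih]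
          simp only [Prod.ext_iff]
          push_cast
          refine ⟨rfl, rfl, by ring⟩
        · simp only [beq_iff_eq] at ih ⊢
          rw [if_neg h1, if_neg h2, if_neg h3, ih]
          simpa using ⟨h1, h2, h3⟩

theorem pv_outer (grid : List (List String)) (g b h : Int) :
    grid.foldl (fun st r =>
      r.foldl (fun st c =>
        if c == "G" then (st.1 + 1, st.2.1, st.2.2)
        else if c == "B" then (st.1, st.2.1 + 1, st.2.2)
        else if c == "#" then (st.1, st.2.1, st.2.2 + 1)
        else st) st) (g, b, h)
    = (g + pvTotal grid "G", b + pvTotal grid "B", h + pvTotal grid "#") := by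
  induction grid generalizing g b h with
  | nil => simp [pvTotal]
  | cons r grid ih =>
    simp only [List.foldl_cons, pv_inner, ih, pvTotal, List.map_cons, List.sum_cons,
      PySem.List.count]
    simp only [Prod.ext_iff]
    refine ⟨by ring, by ring, by ring⟩

-- ===== VERDICT =====
theorem find_occur_spec : Claim_equal_find_occur := by
  intro grid _
  show find_occur grid = find_occur_alt grid
  unfold find_occur find_occur_alt
  rw [pv_outer]
  simp
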